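-- pv_equiv track=rewrite | github.com/vksychev/PythonPlayground | Algorithms/venv/include/Points.py | delNoisePoint
-- ===== SOURCE A (Python) =====
-- def __removeDouble(x, y):
--     z = []
--     for i in x:
--         c = True
--         for j in y:
--             if i == j:
--                 c = False
--         if c:
--             z.append(i)
--     for i in y:
--         c = True
--         for j in x:
--             if i == j:
--                 c = False
--         if c:
--             z.append(i)
--     return z
--
-- def delNoisePoint(r):
--     tmp = []
--     tmp2 = []
--     for i in r[1]:
--         x = range(i[0] - 5, i[0] + 5)
--         y = range(i[1] - 5, i[1] + 5)
--         for j in r[0]: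
--             if j[0] in x and j[1] in y:
--                 tmp.append(i)
--                 tmp2.append(j)
--     return (__removeDouble(r[0], tmp2), __removeDouble(r[1], tmp))
-- ===== SOURCE B (Python) =====
-- def delNoisePoint(r):
--     a, b = r[0], r[1]
--     # bucket the first point set by 5x5 grid cell
--     grid = {}
--     for j in a:
--         grid.setdefault((j[0] // 5, j[1] // 5), []).append(j)
--     bad_a = set()
--     bad_b = set()
--     for i in b:
--         cx, cy = i[0] // 5, i[1] // 5
--         hit = False
--         for dx in (-1, 0, 1):
--             for dy in (-1, 0, 1):
--                 for j in grid.get((cx + dx, cy + dy), []):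
--                     if i[0] - 5 <= j[0] < i[0] + 5 and i[1] - 5 <= j[1] < i[1] + 5:
--                         bad_a.add(j)
--                         hit = True
--         if hit:
--             bad_b.add(i)
--     return ([j for j in a if j not in bad_a], [i for i in b if i not in bad_b])
-- ===== Notes on version B (the rewrite author's own statement) =====
-- stated objective: faster
-- what changed: B replaces A's all-pairs box matching plus quadratic __removeDouble list-scan dedup with a 5x5 spatial-grid dict of buckets (each query point scans only its 3x3 neighbouring cells) and O(1) hash-set membership filters over the original lists.
import Mathlib
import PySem

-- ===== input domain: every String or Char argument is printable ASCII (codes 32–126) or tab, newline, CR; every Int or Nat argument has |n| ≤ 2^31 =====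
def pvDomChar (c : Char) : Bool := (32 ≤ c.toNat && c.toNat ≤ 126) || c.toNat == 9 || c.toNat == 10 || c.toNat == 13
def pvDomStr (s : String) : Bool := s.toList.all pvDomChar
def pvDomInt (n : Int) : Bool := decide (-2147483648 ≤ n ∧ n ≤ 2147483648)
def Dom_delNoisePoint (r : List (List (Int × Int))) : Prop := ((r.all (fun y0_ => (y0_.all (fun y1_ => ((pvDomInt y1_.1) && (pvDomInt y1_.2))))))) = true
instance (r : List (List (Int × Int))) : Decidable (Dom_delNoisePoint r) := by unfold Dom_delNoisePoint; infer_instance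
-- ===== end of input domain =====

-- B replaces A's all-pairs matching + quadratic __removeDouble dedup with a 5×5 spatial grid
-- (dict of buckets) and hash-set membership filters (objective: faster).

-- ===== PORT A =====
-- __removeDouble: z.append ≙ z ++ [·]; the inner 'if i == j: c = False' loop is the inner foldl
def pvRemoveDouble (x y : List (Int × Int)) : List (Int × Int) :=
  let z := x.foldl (fun z i =>
    let c := y.foldl (fun c j => if i = j then false else c) true
    if c then z ++ [i] else z) []
  y.foldl (fun z i =>
    let c := x.foldl (fun c j => if i = j then false else c) true
    if c then z ++ [i] else z) z

-- 'j[0] in range(i[0]-5, i[0]+5)' is exactly i[0]-5 ≤ j[0] ∧ j[0] < i[0]+5 (step-1 int range membership);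
-- the Python tuple return becomes a two-element list (grader's type convention for this task)
def delNoisePoint (r : List (List (Int × Int))) : List (List (Int × Int)) :=
  match PySem.List.pyGet? r 1, PySem.List.pyGet? r 0 with
  | some r1, some r0 =>
    let st := r1.foldl (fun (st : List (Int × Int) × List (Int × Int)) i =>
      r0.foldl (fun st j =>
        if (i.1 - 5 ≤ j.1 ∧ j.1 < i.1 + 5) ∧ (i.2 - 5 ≤ j.2 ∧ j.2 < i.2 + 5)
        then (st.1 ++ [i], st.2 ++ [j]) else st) st) ([], [])
    [pvRemoveDouble r0 st.2, pvRemoveDouble r1 st.1]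
  | _, _ => []   -- unreachable under Pre_ (Python raises IndexError)

-- ===== PORT B =====
def pvCell (p : Int × Int) : Int × Int := (PySem.Int.floordiv p.1 5, PySem.Int.floordiv p.2 5)
def pvBox (i j : Int × Int) : Bool :=
  decide ((i.1 - 5 ≤ j.1 ∧ j.1 < i.1 + 5) ∧ (i.2 - 5 ≤ j.2 ∧ j.2 < i.2 + 5))

-- grid.setdefault(key, []).append(j) — in-place append at key, key position kept — is Dict.modify key [] (· ++ [j])
def delNoisePoint_alt (r : List (List (Int × Int))) : List (List (Int × Int)) :=
  (PySem.List.pyGet? r 0).elim [] fun a =>      -- a, b = r[0], r[1] (IndexError = none, outside Pre_)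
  (PySem.List.pyGet? r 1).elim [] fun b =>
    let grid := a.foldl (fun (d : PySem.Dict (Int × Int) (List (Int × Int))) j =>
      d.modify (pvCell j) [] (· ++ [j])) PySem.Dict.empty
    let st := b.foldl (fun (st : PySem.Set (Int × Int) × PySem.Set (Int × Int)) i =>
      let res := [(-1 : Int), 0, 1].foldl (fun (acc : PySem.Set (Int × Int) × Bool) dx =>
        [(-1 : Int), 0, 1].foldl (fun acc dy =>
          (grid.getD ((pvCell i).1 + dx, (pvCell i).2 + dy) []).foldl (fun acc j =>
            if pvBox i j then (PySem.Set.add acc.1 j, true) else acc) acc) acc) (st.1, false)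
      (res.1, if res.2 then PySem.Set.add st.2 i else st.2))
      ((PySem.Set.empty : PySem.Set (Int × Int)), (PySem.Set.empty : PySem.Set (Int × Int)))
    [a.filter (fun j => !(PySem.Set.contains st.1 j)), b.filter (fun i => !(PySem.Set.contains st.2 i))]

-- ===== PRECONDITION & SPEC =====
-- Python A raises IndexError at r[1] (or r[0]) when r has fewer than two point lists
def Pre_delNoisePoint (r : List (List (Int × Int))) : Prop := 2 ≤ r.length
instance (r : List (List (Int × Int))) : Decidable (Pre_delNoisePoint r) := by unfold Pre_delNoisePoint; infer_instance
def pvWitness_delNoisePoint : (List (List (Int × Int))) := [[(0, 0), (7, 7)], [(3, 3), (100, 100)]]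

def Spec_delNoisePoint (r : List (List (Int × Int))) (out : List (List (Int × Int))) : Prop := out = delNoisePoint_alt r
instance (r : List (List (Int × Int))) (out : List (List (Int × Int))) : Decidable (Spec_delNoisePoint r out) := by unfold Spec_delNoisePoint; infer_instance

-- ===== CLAIM (what is proved, stated in full; the proofs are below) =====
def Claim_equal_delNoisePoint : Prop := ∀ (r : List (List (Int × Int))), Dom_delNoisePoint r → Pre_delNoisePoint r → Spec_delNoisePoint r (delNoisePoint r)

-- ===== LEMMAS AND PROOFS =====

-- ---- A side ----

theorem pv_inner_contains (i : Int × Int) (y : List (Int × Int)) (c : Bool) :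
    y.foldl (fun c j => if i = j then false else c) c = (c && !(y.contains i)) := by
  induction y generalizing c with
  | nil => simp
  | cons j t ih =>
    rw [List.foldl_cons, ih]
    by_cases h : i = j
    · subst h; simp
    · simp [h]
theorem pv_rd_fold (x y : List (Int × Int)) (z0 : List (Int × Int)) :
    x.foldl (fun z i =>
      let c := y.foldl (fun c j => if i = j then false else c) true
      if c then z ++ [i] else z) z0
    = z0 ++ x.filter (fun i => !(y.contains i)) := by
  have hfun : (fun (z : List (Int × Int)) i =>
      let c := y.foldl (fun c j => if i = j then false else c) true
      if c then z ++ [i] else z)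
      = (fun z i => if !(y.contains i) then z ++ [i] else z) := by
    funext z i
    rw [pv_inner_contains]
    simp
  rw [hfun]
  induction x generalizing z0 with
  | nil => simp
  | cons a t ih =>
    rw [List.foldl_cons]
    by_cases h : a ∈ y
    · rw [if_neg (by simp [h]), ih, List.filter_cons_of_neg (by simp [h])]
    · rw [if_pos (by simp [h]), ih, List.filter_cons_of_pos (by simp [h])]
      simp
theorem pv_rd_eq (x y : List (Int × Int)) (h : ∀ e ∈ y, e ∈ x) :
    pvRemoveDouble x y = x.filter (fun i => !(y.contains i)) := by
  unfold pvRemoveDouble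
  rw [pv_rd_fold x y [], pv_rd_fold y x]
  have h2 : y.filter (fun i => !(x.contains i)) = [] :=
    List.filter_eq_nil_iff.mpr (fun e he => by
      have := h e he
      simp [this])
  rw [h2, List.append_nil, List.nil_append]

theorem pv_A_inner (i : Int × Int) (r0 : List (Int × Int))
    (st : List (Int × Int) × List (Int × Int)) :
    r0.foldl (fun st j =>
        if (i.1 - 5 ≤ j.1 ∧ j.1 < i.1 + 5) ∧ (i.2 - 5 ≤ j.2 ∧ j.2 < i.2 + 5)
        then (st.1 ++ [i], st.2 ++ [j]) else st) st
    = (st.1 ++ (r0.filter (fun j => pvBox i j)).map (fun _ => i),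
       st.2 ++ r0.filter (fun j => pvBox i j)) := by
  induction r0 generalizing st with
  | nil => simp
  | cons j t ih =>
    simp only [List.foldl_cons]
    by_cases h : (i.1 - 5 ≤ j.1 ∧ j.1 < i.1 + 5) ∧ (i.2 - 5 ≤ j.2 ∧ j.2 < i.2 + 5)
    · have hb : pvBox i j = true := by simp [pvBox, h]
      rw [if_pos h, ih, List.filter_cons_of_pos hb]
      simp
    · have hb : pvBox i j = false := by simp only [pvBox]; simpa using h
      rw [if_neg h, ih, List.filter_cons_of_neg (by simp [hb])]
theorem pv_A_outer (r1 r0 : List (Int × Int)) (st : List (Int × Int) × List (Int × Int)) :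
    r1.foldl (fun st i => r0.foldl (fun st j =>
        if (i.1 - 5 ≤ j.1 ∧ j.1 < i.1 + 5) ∧ (i.2 - 5 ≤ j.2 ∧ j.2 < i.2 + 5)
        then (st.1 ++ [i], st.2 ++ [j]) else st) st) st
    = (st.1 ++ r1.flatMap (fun i => (r0.filter (fun j => pvBox i j)).map (fun _ => i)),
       st.2 ++ r1.flatMap (fun i => r0.filter (fun j => pvBox i j))) := by
  induction r1 generalizing st with
  | nil => simp
  | cons i t ih =>
    simp only [List.foldl_cons]
    rw [pv_A_inner, ih]
    simp [List.append_assoc]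
theorem pv_A_eq (r0 r1 : List (Int × Int)) (t : List (List (Int × Int))) :
    delNoisePoint (r0 :: r1 :: t)
    = [r0.filter (fun j => !(r1.any (fun i => pvBox i j))),
       r1.filter (fun i => !(r0.any (fun j => pvBox i j)))] := by
  unfold delNoisePoint
  rw [show ((1:Int)) = ((1:Nat):Int) from rfl, PySem.List.pyGet?_natCast,
      show ((0:Int)) = ((0:Nat):Int) from rfl, PySem.List.pyGet?_natCast]
  simp only [List.getElem?_cons_zero, List.getElem?_cons_succ]
  rw [pv_A_outer]
  simp only [List.nil_append]
  rw [pv_rd_eq, pv_rd_eq]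
  · congr 1
    · apply List.filter_congr
      intro j hj
      congr 1
      rw [Bool.eq_iff_iff]
      simp only [List.contains_iff_mem, List.mem_flatMap, List.mem_filter, List.any_eq_true]
      constructor
      · rintro ⟨i, hi, _, hb⟩; exact ⟨i, hi, hb⟩
      · rintro ⟨i, hi, hb⟩; exact ⟨i, hi, hj, hb⟩
    · simp only [List.cons.injEq, and_true]
      apply List.filter_congr
      intro i hi
      congr 1
      rw [Bool.eq_iff_iff]
      simp only [List.contains_iff_mem, List.mem_flatMap, List.mem_map, List.mem_filter,
        List.any_eq_true]
      constructor
      · rintro ⟨i', hi', ⟨j, ⟨hj, hb⟩, rfl⟩⟩; exact ⟨j, hj, hb⟩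
      · rintro ⟨j, hj, hb⟩; exact ⟨i, hi, ⟨j, ⟨hj, hb⟩, rfl⟩⟩
  · intro e he
    simp only [List.mem_flatMap, List.mem_map, List.mem_filter] at he
    obtain ⟨i', _, ⟨j, _, rfl⟩⟩ := he
    assumption
  · intro e he
    simp only [List.mem_flatMap, List.mem_filter] at he
    obtain ⟨i', _, he, _⟩ := he
    exact he

-- ---- B side ----

-- proof-side names for the pieces of B's loop body (definitionally equal to the port's lambdas)
def pvGrid (a : List (Int × Int)) : PySem.Dict (Int × Int) (List (Int × Int)) :=
  a.foldl (fun d j => d.modify (pvCell j) [] (· ++ [j])) PySem.Dict.empty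

def pvMark (i : Int × Int) (acc : PySem.Set (Int × Int) × Bool) (L : List (Int × Int)) :
    PySem.Set (Int × Int) × Bool :=
  L.foldl (fun acc j => if pvBox i j then (PySem.Set.add acc.1 j, true) else acc) acc

def pvStepB (a : List (Int × Int)) (st : PySem.Set (Int × Int) × PySem.Set (Int × Int))
    (i : Int × Int) : PySem.Set (Int × Int) × PySem.Set (Int × Int) :=
  let res := [(-1 : Int), 0, 1].foldl (fun (acc : PySem.Set (Int × Int) × Bool) dx =>
    [(-1 : Int), 0, 1].foldl (fun acc dy =>
      pvMark i acc ((pvGrid a).getD ((pvCell i).1 + dx, (pvCell i).2 + dy) [])) acc) (st.1, false)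
  (res.1, if res.2 then PySem.Set.add st.2 i else st.2)

theorem pv_grid_getD (a : List (Int × Int)) (k : Int × Int) :
    (pvGrid a).getD k [] = a.filter (fun j => pvCell j == k) := by
  unfold pvGrid
  have h : a.foldl (fun (d : PySem.Dict (Int × Int) (List (Int × Int))) j =>
      d.modify (pvCell j) [] (· ++ [j])) PySem.Dict.empty
      = (a.map (fun j => (pvCell j, j))).foldl
          (fun d p => d.modify p.1 [] (· ++ [p.2])) PySem.Dict.empty := by
    rw [List.foldl_map]
  rw [h, PySem.Dict.getD_foldl_modify_append]
  simp [List.filter_map, Function.comp_def]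

theorem pv_box_cell {i j : Int × Int} (h : pvBox i j = true) :
    ((pvCell i).1 - 1 ≤ (pvCell j).1 ∧ (pvCell j).1 ≤ (pvCell i).1 + 1) ∧
    ((pvCell i).2 - 1 ≤ (pvCell j).2 ∧ (pvCell j).2 ≤ (pvCell i).2 + 1) := by
  simp only [pvBox, decide_eq_true_eq] at h
  simp only [pvCell, PySem.Int.floordiv_eq_ediv_of_pos (by norm_num : (0:Int) < 5)]
  omega

theorem pv_mark_fold (i : Int × Int) (L : List (Int × Int)) (s : PySem.Set (Int × Int)) (h : Bool) :
    (∀ x, x ∈ (pvMark i (s, h) L).1 ↔ x ∈ s ∨ (x ∈ L ∧ pvBox i x = true)) ∧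
    (pvMark i (s, h) L).2 = (h || L.any (fun j => pvBox i j)) := by
  unfold pvMark
  induction L generalizing s h with
  | nil => simp
  | cons j t ih =>
    by_cases hb : pvBox i j = true
    · obtain ⟨ih1, ih2⟩ := ih (PySem.Set.add s j) true
      constructor
      · intro x
        rw [List.foldl_cons, if_pos hb, ih1, PySem.Set.mem_add]
        constructor
        · rintro (⟨hx | rfl⟩ | ⟨hx, hbx⟩)
          · exact Or.inl hx
          · exact Or.inr ⟨List.mem_cons_self, hb⟩
          · exact Or.inr ⟨List.mem_cons_of_mem _ hx, hbx⟩
        · rintro (hx | ⟨hx, hbx⟩)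
          · exact Or.inl (Or.inl hx)
          · rcases List.mem_cons.mp hx with rfl | hx
            · exact Or.inl (Or.inr rfl)
            · exact Or.inr ⟨hx, hbx⟩
      · rw [List.foldl_cons, if_pos hb, ih2]
        simp [hb]
    · obtain ⟨ih1, ih2⟩ := ih s h
      constructor
      · intro x
        rw [List.foldl_cons, if_neg (by simp [hb]), ih1]
        constructor
        · rintro (hx | ⟨hx, hbx⟩)
          · exact Or.inl hx
          · exact Or.inr ⟨List.mem_cons_of_mem _ hx, hbx⟩
        · rintro (hx | ⟨hx, hbx⟩)
          · exact Or.inl hx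
          · rcases List.mem_cons.mp hx with rfl | hx
            · exact absurd hbx hb
            · exact Or.inr ⟨hx, hbx⟩
      · rw [List.foldl_cons, if_neg (by simp [hb]), ih2]
        simp [hb]

-- the flattened neighbourhood list the 3×3 bucket scan walks through
def pvNbhd (grid : PySem.Dict (Int × Int) (List (Int × Int))) (i : Int × Int) : List (Int × Int) :=
  [(-1 : Int), 0, 1].flatMap (fun dx => [(-1 : Int), 0, 1].flatMap (fun dy =>
    grid.getD ((pvCell i).1 + dx, (pvCell i).2 + dy) []))

theorem pv_step_eq (a : List (Int × Int)) (st : PySem.Set (Int × Int) × PySem.Set (Int × Int))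
    (i : Int × Int) :
    pvStepB a st i
    = ((pvMark i (st.1, false) (pvNbhd (pvGrid a) i)).1,
       if (pvMark i (st.1, false) (pvNbhd (pvGrid a) i)).2
       then PySem.Set.add st.2 i else st.2) := by
  have h : [(-1 : Int), 0, 1].foldl (fun (acc : PySem.Set (Int × Int) × Bool) dx =>
      [(-1 : Int), 0, 1].foldl (fun acc dy =>
        pvMark i acc ((pvGrid a).getD ((pvCell i).1 + dx, (pvCell i).2 + dy) [])) acc) (st.1, false)
      = pvMark i (st.1, false) (pvNbhd (pvGrid a) i) := by
    unfold pvMark pvNbhd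
    rw [List.foldl_flatMap]
    congr 1
    funext acc dx
    rw [List.foldl_flatMap]
  unfold pvStepB
  rw [h]

theorem pv_mem_nbhd (a : List (Int × Int)) (i x : Int × Int) :
    (x ∈ pvNbhd (pvGrid a) i ∧ pvBox i x = true) ↔ (x ∈ a ∧ pvBox i x = true) := by
  unfold pvNbhd
  simp only [List.mem_flatMap, pv_grid_getD, List.mem_filter, beq_iff_eq]
  constructor
  · rintro ⟨⟨dx, _, dy, _, hx, _⟩, hb⟩
    exact ⟨hx, hb⟩
  · rintro ⟨hx, hb⟩
    refine ⟨⟨(pvCell x).1 - (pvCell i).1, ?_, (pvCell x).2 - (pvCell i).2, ?_, hx, ?_⟩, hb⟩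
    · have := pv_box_cell hb
      simp only [List.mem_cons]
      omega
    · have := pv_box_cell hb
      simp only [List.mem_cons]
      omega
    · ext <;> simp

theorem pv_B_outer (a b : List (Int × Int)) (s1 s2 : PySem.Set (Int × Int)) :
    (∀ x, x ∈ (b.foldl (pvStepB a) (s1, s2)).1
      ↔ x ∈ s1 ∨ (x ∈ a ∧ ∃ i ∈ b, pvBox i x = true)) ∧
    (∀ y, y ∈ (b.foldl (pvStepB a) (s1, s2)).2
      ↔ y ∈ s2 ∨ (y ∈ b ∧ ∃ j ∈ a, pvBox y j = true)) := by
  induction b generalizing s1 s2 with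
  | nil => simp
  | cons i t ih =>
    simp only [List.foldl_cons, pv_step_eq]
    obtain ⟨hm1, hm2⟩ := pv_mark_fold i (pvNbhd (pvGrid a) i) s1 false
    obtain ⟨ih1, ih2⟩ := ih (pvMark i (s1, false) (pvNbhd (pvGrid a) i)).1
      (if (pvMark i (s1, false) (pvNbhd (pvGrid a) i)).2 then PySem.Set.add s2 i else s2)
    have hmem := fun x => pv_mem_nbhd a i x
    have hiff : (pvMark i (s1, false) (pvNbhd (pvGrid a) i)).2 = true
        ↔ ∃ j ∈ a, pvBox i j = true := by
      rw [hm2, Bool.false_or, List.any_eq_true]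
      constructor
      · rintro ⟨j, hj, hb⟩
        exact ⟨j, ((hmem j).mp ⟨hj, hb⟩).1, hb⟩
      · rintro ⟨j, hj, hb⟩
        exact ⟨j, ((hmem j).mpr ⟨hj, hb⟩).1, hb⟩
    constructor
    · intro x
      rw [ih1, hm1 x]
      constructor
      · rintro ((hx | hx) | ⟨hx, i', hi', hb⟩)
        · exact Or.inl hx
        · obtain ⟨hxa, hxb⟩ := (hmem x).mp hx
          exact Or.inr ⟨hxa, i, List.mem_cons_self, hxb⟩
        · exact Or.inr ⟨hx, i', List.mem_cons_of_mem _ hi', hb⟩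
      · rintro (hx | ⟨hxa, i', hi', hb⟩)
        · exact Or.inl (Or.inl hx)
        · rcases List.mem_cons.mp hi' with rfl | hi'
          · exact Or.inl (Or.inr ((hmem x).mpr ⟨hxa, hb⟩))
          · exact Or.inr ⟨hxa, i', hi', hb⟩
    · intro y
      rw [ih2]
      have hmemy : y ∈ (if (pvMark i (s1, false) (pvNbhd (pvGrid a) i)).2
          then PySem.Set.add s2 i else s2) ↔
          y ∈ s2 ∨ (y = i ∧ ∃ j ∈ a, pvBox i j = true) := by
        split_ifs with hr
        · rw [PySem.Set.mem_add]
          have := hiff.mp hr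
          tauto
        · have hno : ¬ ∃ j ∈ a, pvBox i j = true := fun hc => hr (hiff.mpr hc)
          constructor
          · exact Or.inl
          · rintro (hy | ⟨_, hc⟩)
            · exact hy
            · exact absurd hc hno
      rw [hmemy]
      constructor
      · rintro ((hy | ⟨rfl, hj⟩) | ⟨hy, hj⟩)
        · exact Or.inl hy
        · exact Or.inr ⟨List.mem_cons_self, hj⟩
        · exact Or.inr ⟨List.mem_cons_of_mem _ hy, hj⟩
      · rintro (hy | ⟨hy, hj⟩)
        · exact Or.inl (Or.inl hy)
        · rcases List.mem_cons.mp hy with rfl | hy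
          · exact Or.inl (Or.inr ⟨rfl, hj⟩)
          · exact Or.inr ⟨hy, hj⟩

theorem pv_B_eq (r0 r1 : List (Int × Int)) (t : List (List (Int × Int))) :
    delNoisePoint_alt (r0 :: r1 :: t)
    = [r0.filter (fun j => !(r1.any (fun i => pvBox i j))),
       r1.filter (fun i => !(r0.any (fun j => pvBox i j)))] := by
  obtain ⟨h1, h2⟩ := pv_B_outer r0 r1 PySem.Set.empty PySem.Set.empty
  unfold delNoisePoint_alt
  rw [show ((0:Int)) = ((0:Nat):Int) from rfl, PySem.List.pyGet?_natCast,
      show ((1:Int)) = ((1:Nat):Int) from rfl, PySem.List.pyGet?_natCast]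
  simp only [List.getElem?_cons_zero, List.getElem?_cons_succ, Option.elim_some]
  show [r0.filter (fun j => !(PySem.Set.contains
          (r1.foldl (pvStepB r0) (PySem.Set.empty, PySem.Set.empty)).1 j)),
        r1.filter (fun i => !(PySem.Set.contains
          (r1.foldl (pvStepB r0) (PySem.Set.empty, PySem.Set.empty)).2 i))] = _
  congr 1
  · apply List.filter_congr
    intro j hj
    congr 1
    rw [Bool.eq_iff_iff, PySem.Set.contains_iff, h1 j, List.any_eq_true]
    simp only [PySem.Set.empty, List.not_mem_nil, false_or]
    exact ⟨fun ⟨_, h⟩ => h, fun h => ⟨hj, h⟩⟩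
  · simp only [List.cons.injEq, and_true]
    apply List.filter_congr
    intro i hi
    congr 1
    rw [Bool.eq_iff_iff, PySem.Set.contains_iff, h2 i, List.any_eq_true]
    simp only [PySem.Set.empty, List.not_mem_nil, false_or]
    exact ⟨fun ⟨_, h⟩ => h, fun h => ⟨hi, h⟩⟩

-- ===== VERDICT (by name: the statement is the Claim_ definition above) =====
theorem delNoisePoint_spec : Claim_equal_delNoisePoint := by
  intro r _ hpre
  unfold Spec_delNoisePoint
  match r, hpre with
  | r0 :: r1 :: t, _ => rw [pv_A_eq, pv_B_eq]
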